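-- pv_equiv track=rewrite | github.com/jpibz/couch | src/bash_tool/bash_command_preprocessor.py | _expand_aliases
-- ===== SOURCE A (Python) =====
-- def _expand_aliases(command: str) -> str:
--     """Expand bash aliases"""
--     aliases = {
--         'll ': 'ls -la ',
--         'll\n': 'ls -la\n',
--         'la ': 'ls -A ',
--         'la\n': 'ls -A\n',
--         'l ': 'ls -CF ',
--         'l\n': 'ls -CF\n',
--     }
--
--     for alias, expansion in aliases.items():
--         if command.startswith(alias.rstrip(' \n')):
--             command = command.replace(alias.rstrip(' \n'), expansion.rstrip(' \n'), 1)
--             break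
--
--     return command
-- ===== SOURCE B (Python) =====
-- def _expand_aliases(command: str) -> str:
--     """Expand bash aliases: expand only a whole first word, as bash does."""
--     aliases = {'ll': 'ls -la', 'la': 'ls -A', 'l': 'ls -CF'}
--     end = len(command)
--     for i, ch in enumerate(command):
--         if ch in ' \n':
--             end = i
--             break
--     expansion = aliases.get(command[:end])
--     if expansion is None:
--         return command
--     return expansion + command[end:]
-- ===== Notes on version B (the rewrite author's own statement) =====
-- stated objective: alternative
-- what changed: Replaced A's loop of rstripped-alias startswith checks with first-occurrence str.replace by a tokenize-then-lookup algorithm: scan once for the first space/newline, take the whole first word, and look it up in an alias dict, so only an exact first-word alias is expanded.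
-- intended difference: On commands whose first word merely begins with an alias (e.g. 'ls -la', 'less x', 'lla'), A rewrites the alias letters inside the word ('ls -la' -> 'ls -CFs -la'); B leaves the command unchanged, expanding only whole first words as bash aliases do, which is what A's trailing-space/newline dict keys evidently intended before rstrip discarded them. — e.g. on _expand_aliases("ls"): A returns "ls -CFs", B returns "ls"
import Mathlib
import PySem

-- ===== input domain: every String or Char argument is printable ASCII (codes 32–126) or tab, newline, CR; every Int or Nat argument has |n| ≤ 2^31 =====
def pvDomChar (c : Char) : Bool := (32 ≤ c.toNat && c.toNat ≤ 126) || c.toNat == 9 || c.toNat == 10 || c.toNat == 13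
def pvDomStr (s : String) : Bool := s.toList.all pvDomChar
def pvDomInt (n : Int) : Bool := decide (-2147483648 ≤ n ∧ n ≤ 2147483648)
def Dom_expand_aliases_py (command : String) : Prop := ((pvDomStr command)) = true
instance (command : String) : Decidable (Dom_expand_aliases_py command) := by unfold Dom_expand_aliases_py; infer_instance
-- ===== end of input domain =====

-- B tokenizes the first space/newline-delimited word and looks it up in an alias dict (bash-style
-- whole-word expansion), instead of A's loop of rstripped prefix replaces; they differ exactly where
-- A rewrites alias letters inside a longer first word (see D_ below).

-- ===== PORT A =====
-- exact port of str.rstrip(chars): drop trailing chars that are in `chars`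
def pvRstripChars (cs chars : List Char) : List Char :=
  (cs.reverse.dropWhile (chars.contains ·)).reverse

-- exact port of s.replace(old, new, 1): splice `new` over the first occurrence of `old` (none → unchanged)
def pvReplace1 (s old new : List Char) : List Char :=
  let i := PySem.Chars.find s old
  if i = -1 then s else s.take i.toNat ++ new ++ s.drop (i.toNat + old.length)

-- the for-loop over aliases.items() with break
def pvAliasLoop : List (List Char × List Char) → List Char → List Char
  | [], cmd => cmd
  | (a, e) :: rest, cmd =>
      if PySem.Chars.startswith cmd (pvRstripChars a [' ', '\n']) then
        pvReplace1 cmd (pvRstripChars a [' ', '\n']) (pvRstripChars e [' ', '\n'])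
      else pvAliasLoop rest cmd

def expand_aliases_py (command : String) : String :=
  String.mk (pvAliasLoop
    [("ll ".toList, "ls -la ".toList), ("ll\n".toList, "ls -la\n".toList),
     ("la ".toList, "ls -A ".toList), ("la\n".toList, "ls -A\n".toList),
     ("l ".toList, "ls -CF ".toList), ("l\n".toList, "ls -CF\n".toList)]
    command.toList)

-- ===== PORT B =====
-- the enumerate-loop of Source B: index of the first ' '/'\n', or the length if none
def pvFirstSep : List Char → Nat
  | [] => 0
  | c :: cs => if c = ' ' ∨ c = '\n' then 0 else pvFirstSep cs + 1

-- the alias dict of Source B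
def pvAliasDict : PySem.Dict (List Char) (List Char) :=
  PySem.Dict.ofList
    [("ll".toList, "ls -la".toList), ("la".toList, "ls -A".toList), ("l".toList, "ls -CF".toList)]

def expand_aliases_py_alt (command : String) : String :=
  let cs := command.toList
  let e := pvFirstSep cs
  match PySem.Dict.get? pvAliasDict (cs.take e) with
  | some expansion => String.mk (expansion ++ cs.drop e)
  | none => command

-- ===== PRECONDITION & SPEC =====
-- On commands whose first word merely BEGINS with an alias ('lla', 'ls -la', 'less x'), A rewrites
-- the alias letters inside the word (e.g. 'ls -la' → 'ls -CFs -la', 'less x' → 'ls -CFess x');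
-- B leaves such commands unchanged, expanding only a whole first word as bash aliases do — which is
-- what A's trailing-space/newline dict keys evidently intended before rstrip discarded them.
def D_expand_aliases_py (command : String) : Prop :=
  command.toList.take 1 = ['l'] ∧
  (command.toList.drop (if command.toList.take 2 = ['l', 'l'] ∨ command.toList.take 2 = ['l', 'a'] then 2 else 1)).take 1
    ∉ [[], [' '], ['\n']]
instance (command : String) : Decidable (D_expand_aliases_py command) := by
  unfold D_expand_aliases_py; infer_instance

def Spec_expand_aliases_py (command : String) (out : String) : Prop :=
  ¬ D_expand_aliases_py command → out = expand_aliases_py_alt command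
instance (command : String) (out : String) : Decidable (Spec_expand_aliases_py command out) := by
  unfold Spec_expand_aliases_py; infer_instance

def pvDiffWitness_expand_aliases_py : String := "ls"
def pvDiffWitnessOut_expand_aliases_py : String × String := ("ls -CFs", "ls")

-- ===== CLAIM (what is proved, stated in full; the proofs are below) =====
def Claim_unchanged_expand_aliases_py : Prop :=
  ∀ (command : String), Dom_expand_aliases_py command →
    Spec_expand_aliases_py command (expand_aliases_py command)
def Claim_changed_expand_aliases_py : Prop :=
  Dom_expand_aliases_py (pvDiffWitness_expand_aliases_py) ∧
  D_expand_aliases_py (pvDiffWitness_expand_aliases_py) ∧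
  expand_aliases_py (pvDiffWitness_expand_aliases_py) = pvDiffWitnessOut_expand_aliases_py.1 ∧
  expand_aliases_py_alt (pvDiffWitness_expand_aliases_py) = pvDiffWitnessOut_expand_aliases_py.2 ∧
  pvDiffWitnessOut_expand_aliases_py.1 ≠ pvDiffWitnessOut_expand_aliases_py.2
def Claim_exact_expand_aliases_py : Prop :=
  ∀ (command : String), Dom_expand_aliases_py command → D_expand_aliases_py command →
    expand_aliases_py command ≠ expand_aliases_py_alt command

-- ===== LEMMAS AND PROOFS =====

-- the change region as a structural predicate over the char list (proof-side form of D_)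
def pvBadPrefix : List Char → Bool
  | 'l' :: 'l' :: c :: _ => !(c = ' ' || c = '\n')
  | 'l' :: 'a' :: c :: _ => !(c = ' ' || c = '\n')
  | 'l' :: c :: _ => !(c = 'l' || c = 'a' || c = ' ' || c = '\n')
  | _ => false

theorem pvD_iff (command : String) :
    D_expand_aliases_py command ↔ pvBadPrefix command.toList = true := by
  unfold D_expand_aliases_py
  generalize command.toList = cs
  match cs with
  | [] => simp [pvBadPrefix]
  | [a] =>
    by_cases ha : a = 'l' <;> simp [pvBadPrefix, ha]
  | a :: b :: t =>
    by_cases ha : a = 'l'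
    · subst ha
      by_cases hbl : b = 'l'
      · subst hbl
        match t with
        | [] => simp [pvBadPrefix]
        | c :: t' => simp [pvBadPrefix]
      · by_cases hba : b = 'a'
        · subst hba
          match t with
          | [] => simp [pvBadPrefix]
          | c :: t' => simp [pvBadPrefix]
        · simp [pvBadPrefix, hbl, hba, Ne.symm hbl, Ne.symm hba]
    · simp [pvBadPrefix, ha, Ne.symm ha]

-- characterization of A's loop: plain prefix rewriting on the first one/two characters
def pvACore : List Char → List Char
  | 'l' :: 'l' :: rest => "ls -la".toList ++ rest
  | 'l' :: 'a' :: rest => "ls -A".toList ++ rest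
  | 'l' :: rest => "ls -CF".toList ++ rest
  | cs => cs

theorem pvFind_eq_zero_of_prefix {s old : List Char} (h : old <+: s) :
    PySem.Chars.find s old = 0 := by
  have h0 : 0 ≤ PySem.Chars.find s old :=
    (PySem.Chars.find_nonneg_iff s old).2 h.isInfix
  have hspec := PySem.Chars.find_spec (s := s) (sub := old) h0
  by_contra hne
  have hpos : 0 < (PySem.Chars.find s old).toNat := by omega
  have := hspec.2 0 hpos
  simp at this
  exact this h

theorem pvReplace1_of_prefix {s old : List Char} (new : List Char) (h : old <+: s) :
    pvReplace1 s old new = new ++ s.drop old.length := by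
  simp [pvReplace1, pvFind_eq_zero_of_prefix h]

theorem pvCore_eq (cs : List Char) : pvAliasLoop
    [("ll ".toList, "ls -la ".toList), ("ll\n".toList, "ls -la\n".toList),
     ("la ".toList, "ls -A ".toList), ("la\n".toList, "ls -A\n".toList),
     ("l ".toList, "ls -CF ".toList), ("l\n".toList, "ls -CF\n".toList)] cs
    = pvACore cs := by
  match cs with
  | [] => decide
  | c :: cs' =>
    by_cases hc : c = 'l'
    · subst hc
      match cs' with
      | [] => decide
      | d :: cs'' =>
        by_cases hll : d = 'l'
        · subst hll
          have hpre : ['l', 'l'] <+: 'l' :: 'l' :: cs'' := ⟨cs'', rfl⟩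
          simp [pvAliasLoop, pvACore, pvRstripChars,
                PySem.Chars.startswith_iff, hpre,
                pvReplace1_of_prefix _ hpre]
        · by_cases hla : d = 'a'
          · subst hla
            have hpre : ['l', 'a'] <+: 'l' :: 'a' :: cs'' := ⟨cs'', rfl⟩
            have hnll : ¬ (['l', 'l'] <+: 'l' :: 'a' :: cs'') := by
              intro ⟨t, ht⟩; simp at ht
            simp [pvAliasLoop, pvACore, pvRstripChars,
                  PySem.Chars.startswith_iff, hpre, hnll,
                  pvReplace1_of_prefix _ hpre]
          · have hpre : ['l'] <+: 'l' :: d :: cs'' := ⟨d :: cs'', rfl⟩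
            have hnll : ¬ (['l', 'l'] <+: 'l' :: d :: cs'') := by
              intro ⟨t, ht⟩; simp at ht; exact hll ht.1.symm
            have hnla : ¬ (['l', 'a'] <+: 'l' :: d :: cs'') := by
              intro ⟨t, ht⟩; simp at ht; exact hla ht.1.symm
            simp [pvAliasLoop, pvACore, pvRstripChars,
                  PySem.Chars.startswith_iff, hpre, hnll, hnla, hll, hla,
                  pvReplace1_of_prefix _ hpre]
    · have h1 : ¬ (['l'] <+: c :: cs') := by
        intro ⟨t, ht⟩; simp at ht; exact hc ht.1.symm
      have h2 : ¬ (['l', 'l'] <+: c :: cs') := by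
        intro ⟨t, ht⟩; simp at ht; exact hc ht.1.symm
      have h3 : ¬ (['l', 'a'] <+: c :: cs') := by
        intro ⟨t, ht⟩; simp at ht; exact hc ht.1.symm
      simp [pvAliasLoop, pvACore, pvRstripChars,
            PySem.Chars.startswith_iff, h1, h2, h3, hc]

theorem pvA_eq (command : String) :
    expand_aliases_py command = String.mk (pvACore command.toList) := by
  unfold expand_aliases_py; rw [pvCore_eq]

-- the literal dict as a Dict.mk, so get?_mk_cons applies
theorem pvAliasDict_eq : pvAliasDict = PySem.Dict.mk
    [("ll".toList, "ls -la".toList), ("la".toList, "ls -A".toList), ("l".toList, "ls -CF".toList)] := by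
  decide

-- lookup is none when the word does not start with 'l'
theorem pvToList_mk (l : List Char) : (String.mk l).toList = l :=
  Eq.symm (String.ofList_eq.mp rfl)

theorem pvB_eq (command : String) : expand_aliases_py_alt command =
    (match PySem.Dict.get? pvAliasDict (command.toList.take (pvFirstSep command.toList)) with
     | some e => String.mk (e ++ command.toList.drop (pvFirstSep command.toList))
     | none => command) := rfl

theorem pvMain (cs : List Char) (hD : pvBadPrefix cs = false) :
    String.mk (pvACore cs) =
      (match PySem.Dict.get? pvAliasDict (cs.take (pvFirstSep cs)) with
       | some e => String.mk (e ++ cs.drop (pvFirstSep cs))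
       | none => String.mk cs) := by
  rw [pvAliasDict_eq]
  match cs with
  | [] => rfl
  | c :: cs' =>
    by_cases hc : c = 'l'
    · subst hc
      match cs' with
      | [] => rfl
      | d :: cs'' =>
        by_cases hll : d = 'l'
        · subst hll
          match cs'' with
          | [] => rfl
          | e :: t =>
            have hsep : e = ' ' ∨ e = '\n' := by
              simp [pvBadPrefix] at hD; tauto
            rcases hsep with h | h <;> subst h <;>
              simp [pvACore, pvFirstSep, PySem.Dict.get?]
        · by_cases hla : d = 'a'
          · subst hla
            match cs'' with
            | [] => rfl
            | e :: t =>
              have hsep : e = ' ' ∨ e = '\n' := by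
                simp [pvBadPrefix] at hD; tauto
              rcases hsep with h | h <;> subst h <;>
                simp [pvACore, pvFirstSep, PySem.Dict.get?]
          · have hsep : d = ' ' ∨ d = '\n' := by
              simp [pvBadPrefix, hll, hla] at hD; tauto
            rcases hsep with h | h <;> subst h <;>
              simp [pvACore, pvFirstSep, PySem.Dict.get?, hll, hla]
    · by_cases hsep : c = ' ' ∨ c = '\n'
      · rcases hsep with h | h <;> subst h <;>
          simp [pvACore, pvFirstSep, PySem.Dict.get?]
      · have hs1 : ¬ c = ' ' := fun h => hsep (Or.inl h)
        have hs2 : ¬ c = '\n' := fun h => hsep (Or.inr h)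
        simp [pvACore, pvFirstSep, PySem.Dict.get?, hc, hs1, hs2, Ne.symm hc]

theorem pvBGet (cs : List Char) (hD : pvBadPrefix cs = true) :
    PySem.Dict.get? pvAliasDict (cs.take (pvFirstSep cs)) = none := by
  rw [pvAliasDict_eq]
  match cs with
  | [] => simp [pvBadPrefix] at hD
  | c :: cs' =>
    by_cases hc : c = 'l'
    · subst hc
      match cs' with
      | [] => simp [pvBadPrefix] at hD
      | d :: cs'' =>
        by_cases hll : d = 'l'
        · subst hll
          match cs'' with
          | [] => simp [pvBadPrefix] at hD
          | e :: t =>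
            simp [pvBadPrefix] at hD
            simp [pvFirstSep, hD.1, hD.2, PySem.Dict.get?]
        · by_cases hla : d = 'a'
          · subst hla
            match cs'' with
            | [] => simp [pvBadPrefix] at hD
            | e :: t =>
              simp [pvBadPrefix] at hD
              simp [pvFirstSep, hD.1, hD.2, PySem.Dict.get?]
          · simp [pvBadPrefix, hll, hla] at hD
            simp [pvFirstSep, hD.1, hD.2, PySem.Dict.get?]
            exact ⟨fun h => absurd h.symm hll, fun h => absurd h.symm hla⟩
    · simp [pvBadPrefix, hc] at hD

theorem pvTight (cs : List Char) (hD : pvBadPrefix cs = true) :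
    cs.length < (pvACore cs).length := by
  match cs with
  | [] => simp [pvBadPrefix] at hD
  | c :: cs' =>
    by_cases hc : c = 'l'
    · subst hc
      match cs' with
      | [] => simp [pvBadPrefix] at hD
      | d :: cs'' =>
        by_cases hll : d = 'l'
        · subst hll; simp [pvACore]
        · by_cases hla : d = 'a'
          · subst hla; simp [pvACore]
          · simp [pvACore, hll, hla]
    · simp [pvBadPrefix, hc] at hD

theorem expand_aliases_py_spec : Claim_unchanged_expand_aliases_py := by
  intro command _ hD
  have hB : pvBadPrefix command.toList = false := by
    rw [← Bool.not_eq_true]; exact fun h => hD ((pvD_iff command).mpr h)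
  rw [pvA_eq, pvB_eq, pvMain command.toList hB]
  cases PySem.Dict.get? pvAliasDict (command.toList.take (pvFirstSep command.toList)) with
  | none => exact String.ofList_toList
  | some e => rfl

theorem expand_aliases_py_changed : Claim_changed_expand_aliases_py := by
  unfold Claim_changed_expand_aliases_py; decide

theorem expand_aliases_py_tight : Claim_exact_expand_aliases_py := by
  intro command _ hD heq
  have hB := (pvD_iff command).mp hD
  rw [pvA_eq, pvB_eq, pvBGet command.toList hB] at heq
  have h1 : pvACore command.toList = command.toList := by
    have h0 := congrArg String.toList heq
    rwa [pvToList_mk] at h0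
  have h3 := pvTight command.toList hB
  rw [h1] at h3
  exact lt_irrefl _ h3
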